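-- pv_equiv track=rewrite | github.com/jeeva132/coding_python | oddevedif.py | indexdif
-- ===== SOURCE A (Python) =====
-- def indexdif(i1,i2):
--     total = 0
--     for i in range(i1):
--         if i%2 == 0:
--             total +=i2[i]
--         else:
--             total -=i2[i]
--     return total
-- ===== SOURCE B (Python) =====
-- def indexdif(i1, i2):
--     if i1 <= 0:
--         return 0
--     total = sum(i2[i] - i2[i + 1] for i in range(0, i1 - 1, 2))
--     if i1 % 2:
--         total += i2[i1 - 1]
--     return total
-- ===== Notes on version B (the rewrite author's own statement) =====
-- stated objective: alternative
-- what changed: Instead of a per-element loop with a parity branch, B sums pairwise differences i2[i]-i2[i+1] over consecutive pairs (half as many iterations, different loop state) and adds the leftover element when i1 is odd.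
import Mathlib
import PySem

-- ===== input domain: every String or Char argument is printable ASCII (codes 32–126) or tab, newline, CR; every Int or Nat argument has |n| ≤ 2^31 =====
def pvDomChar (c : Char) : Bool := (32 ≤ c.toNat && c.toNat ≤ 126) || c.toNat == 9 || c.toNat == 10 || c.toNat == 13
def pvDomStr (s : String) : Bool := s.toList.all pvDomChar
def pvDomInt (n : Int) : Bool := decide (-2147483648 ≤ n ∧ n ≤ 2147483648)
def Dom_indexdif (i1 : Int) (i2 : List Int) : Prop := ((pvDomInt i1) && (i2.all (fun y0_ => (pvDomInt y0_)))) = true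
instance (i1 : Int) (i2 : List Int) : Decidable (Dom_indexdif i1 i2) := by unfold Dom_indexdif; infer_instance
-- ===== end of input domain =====

-- B replaces A's per-element parity-branch loop by a sum of pairwise differences i2[i]-i2[i+1]
-- over consecutive pairs plus the leftover element when i1 is odd; alternative decomposition, same O(n).

-- ===== PORT A =====
def indexdif (i1 : Int) (i2 : List Int) : Int :=
  (PySem.List.pyRange 0 i1 1).foldl
    (fun total i =>
      if PySem.Int.mod i 2 == 0 then total + PySem.List.pyGetD i2 i 0
      else total - PySem.List.pyGetD i2 i 0) 0

-- ===== PORT B =====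
def indexdif_alt (i1 : Int) (i2 : List Int) : Int :=
  if i1 ≤ 0 then 0
  else
    let total := (PySem.List.pyRange 0 (i1 - 1) 2).foldl
      (fun t i => t + (PySem.List.pyGetD i2 i 0 - PySem.List.pyGetD i2 (i + 1) 0)) 0
    if PySem.Int.mod i1 2 == 1 then total + PySem.List.pyGetD i2 (i1 - 1) 0 else total

-- ===== PRECONDITION & SPEC =====
-- Pre_: A (and B) index i2 at every i < i1, so i1 > len(i2) raises IndexError in Python.
def Pre_indexdif (i1 : Int) (i2 : List Int) : Prop := i1 ≤ (i2.length : Int)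
instance (i1 : Int) (i2 : List Int) : Decidable (Pre_indexdif i1 i2) := by unfold Pre_indexdif; infer_instance
def pvWitness_indexdif : Int × List Int := (3, [4, -2, 7])

def Spec_indexdif (i1 : Int) (i2 : List Int) (out : Int) : Prop := out = indexdif_alt i1 i2
instance (i1 : Int) (i2 : List Int) (out : Int) : Decidable (Spec_indexdif i1 i2 out) := by unfold Spec_indexdif; infer_instance

-- ===== CLAIM (what is proved, stated in full; the proofs are below) =====
def Claim_equal_indexdif : Prop := ∀ (i1 : Int) (i2 : List Int), Dom_indexdif i1 i2 → Pre_indexdif i1 i2 → Spec_indexdif i1 i2 (indexdif i1 i2)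

-- ===== LEMMAS AND PROOFS =====

-- a step-2 range gains its endpoint exactly when the endpoint has the start's parity
lemma range2_snoc (a b : Int) (ha : a ≤ b) (hpar : (b - a) % 2 = 0) :
    PySem.List.pyRange a (b + 1) 2 = PySem.List.pyRange a b 2 ++ [b] := by
  rcases eq_or_lt_of_le ha with h | h
  · subst h
    rw [PySem.List.pyRange_of_pos _ _ (by norm_num), PySem.List.pyRange_of_pos _ _ (by norm_num)]
    rw [if_pos (by omega), if_neg (lt_irrefl a),
      show ((a + 1 - a + 2 - 1) / 2).toNat = 1 by omega]
    simp
  · rw [PySem.List.pyRange_of_pos _ _ (by norm_num), PySem.List.pyRange_of_pos _ _ (by norm_num)]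
    rw [if_pos (by omega), if_pos h,
      show ((b + 1 - a + 2 - 1) / 2).toNat = ((b - a + 2 - 1) / 2).toNat + 1 by omega,
      List.range_succ, List.map_append]
    congr 2
    simp only [List.map_cons, List.map_nil, List.cons.injEq, and_true]
    omega

lemma range2_skip (a b : Int) (hpar : (b - a) % 2 = 1) :
    PySem.List.pyRange a (b + 1) 2 = PySem.List.pyRange a b 2 := by
  rw [PySem.List.pyRange_of_pos _ _ (by norm_num), PySem.List.pyRange_of_pos _ _ (by norm_num)]
  by_cases h : a < b
  · rw [if_pos (by omega), if_pos h, show ((b + 1 - a + 2 - 1) / 2).toNat = ((b - a + 2 - 1) / 2).toNat by omega]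
  · have hb : ¬ a < b + 1 := by omega
    rw [if_neg hb, if_neg h]

-- B's pair-sum for an even prefix length, uniform over n = 0 and n > 0
lemma alt_even (n : Nat) (i2 : List Int) (hpar : (n : Int) % 2 = 0) :
    indexdif_alt (n : Int) i2 =
      (PySem.List.pyRange 0 ((n : Int) - 1) 2).foldl
        (fun t i => t + (PySem.List.pyGetD i2 i 0 - PySem.List.pyGetD i2 (i + 1) 0)) 0 := by
  unfold indexdif_alt
  rcases Nat.eq_zero_or_pos n with h | h
  · subst h
    rw [if_pos (by norm_num)]
    rw [PySem.List.pyRange_of_pos _ _ (by norm_num : (0:Int) < 2), if_neg (by norm_num)]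
    rfl
  · rw [if_neg (by omega)]
    have hm : PySem.Int.mod (n : Int) 2 = 0 := by
      simp only [PySem.Int.mod]
      rw [Int.fmod_eq_emod]; exact hpar
    rw [hm]
    norm_num

lemma indexdif_eq_alt_nat (n : Nat) (i2 : List Int) :
    indexdif (n : Int) i2 = indexdif_alt (n : Int) i2 := by
  induction n using Nat.twoStepInduction with
  | zero =>
      simp only [Nat.cast_zero]
      unfold indexdif indexdif_alt
      rw [PySem.List.pyRange_one_eq_nil (le_refl (0 : Int)), if_pos (le_refl (0 : Int))]
      rfl
  | one =>
      simp only [Nat.cast_one]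
      unfold indexdif indexdif_alt
      rw [show PySem.List.pyRange 0 1 1 = [0] from PySem.List.pyRange_one_singleton 0,
        if_neg (by norm_num)]
      have hm : PySem.Int.mod (1 : Int) 2 = 1 := by decide
      rw [hm]
      have hr : PySem.List.pyRange 0 ((1 : Int) - 1) 2 = [] := by decide
      rw [hr]
      simp [PySem.Int.mod]
  | more n ih _ =>
      have hn : (0 : Int) ≤ (n : Int) := by omega
      have hc : ((n + 2 : Nat) : Int) = (n : Int) + 2 := by push_cast; ring
      rw [hc]
      have hemod : ∀ k : Int, 0 ≤ k → PySem.Int.mod k 2 = k % 2 := by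
        intro k hk
        simp only [PySem.Int.mod]
        rw [Int.fmod_eq_emod]
        simp
      -- A side: peel the last two indices n and n+1
      have hA : indexdif ((n : Int) + 2) i2 =
          (if PySem.Int.mod ((n : Int) + 1) 2 == 0
            then (if PySem.Int.mod (n : Int) 2 == 0
                  then indexdif (n : Int) i2 + PySem.List.pyGetD i2 (n : Int) 0
                  else indexdif (n : Int) i2 - PySem.List.pyGetD i2 (n : Int) 0)
                 + PySem.List.pyGetD i2 ((n : Int) + 1) 0
            else (if PySem.Int.mod (n : Int) 2 == 0
                  then indexdif (n : Int) i2 + PySem.List.pyGetD i2 (n : Int) 0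
                  else indexdif (n : Int) i2 - PySem.List.pyGetD i2 (n : Int) 0)
                 - PySem.List.pyGetD i2 ((n : Int) + 1) 0) := by
        unfold indexdif
        rw [show (n : Int) + 2 = ((n : Int) + 1) + 1 by omega,
          PySem.List.pyRange_one_succ_right (by omega : (0:Int) ≤ (n : Int) + 1),
          PySem.List.pyRange_one_succ_right hn,
          List.foldl_append, List.foldl_append]
        simp only [List.foldl_cons, List.foldl_nil]
      by_cases hpar : (n : Int) % 2 = 0
      · -- n even: A(n+2) = A(n) + get n - get (n+1)
        have hBn2 : indexdif_alt ((n : Int) + 2) i2 =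
            (PySem.List.pyRange 0 ((n : Int) + 2 - 1) 2).foldl
              (fun t i => t + (PySem.List.pyGetD i2 i 0 - PySem.List.pyGetD i2 (i + 1) 0)) 0 := by
          have h := alt_even (n + 2) i2 (by push_cast; omega)
          rwa [hc] at h
        have hr : PySem.List.pyRange 0 ((n : Int) + 2 - 1) 2
            = PySem.List.pyRange 0 ((n : Int) - 1) 2 ++ [(n : Int)] := by
          have h1 : PySem.List.pyRange 0 ((n : Int) + 1) 2
              = PySem.List.pyRange 0 (n : Int) 2 ++ [(n : Int)] :=
            range2_snoc 0 (n : Int) hn (by omega)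
          have h2 : PySem.List.pyRange 0 (((n : Int) - 1) + 1) 2
              = PySem.List.pyRange 0 ((n : Int) - 1) 2 :=
            range2_skip 0 ((n : Int) - 1) (by omega)
          have h3 : PySem.List.pyRange 0 (n : Int) 2
              = PySem.List.pyRange 0 ((n : Int) - 1) 2 := by
            rw [← h2]; congr 1; omega
          rw [show (n : Int) + 2 - 1 = (n : Int) + 1 by omega, h1, h3]
        rw [hA, hBn2, hemod _ (by omega : (0:Int) ≤ (n : Int) + 1),
          show ((n : Int) + 1) % 2 = 1 by omega, hemod _ hn, hpar]
        rw [if_neg (by decide : ¬ ((((1:Int)) == 0) = true)),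
          if_pos (by decide : ((((0:Int)) == 0) = true))]
        rw [ih, alt_even n i2 hpar, hr, List.foldl_append]
        simp only [List.foldl_cons, List.foldl_nil, PySem.List.pyGetD_natCast]
        ring
      · -- n odd: A(n+2) = A(n) - get n + get (n+1)
        have hpar1 : (n : Int) % 2 = 1 := by omega
        have hr2 : PySem.List.pyRange 0 ((n : Int) + 2 - 1) 2
            = PySem.List.pyRange 0 ((n : Int) - 1) 2 ++ [(n : Int) - 1] := by
          have h1 : PySem.List.pyRange 0 ((n : Int) + 1) 2
              = PySem.List.pyRange 0 (n : Int) 2 :=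
            range2_skip 0 (n : Int) (by omega)
          have h2 : PySem.List.pyRange 0 (((n : Int) - 1) + 1) 2
              = PySem.List.pyRange 0 ((n : Int) - 1) 2 ++ [(n : Int) - 1] :=
            range2_snoc 0 ((n : Int) - 1) (by omega) (by omega)
          have h3 : PySem.List.pyRange 0 (n : Int) 2
              = PySem.List.pyRange 0 ((n : Int) - 1) 2 ++ [(n : Int) - 1] := by
            rw [← h2]; congr 1; omega
          rw [show (n : Int) + 2 - 1 = (n : Int) + 1 by omega, h1, h3]
        rw [hA, hemod _ (by omega : (0:Int) ≤ (n : Int) + 1),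
          show ((n : Int) + 1) % 2 = 0 by omega, hemod _ hn, hpar1]
        rw [if_pos (by decide : ((((0:Int)) == 0) = true)),
          if_neg (by decide : ¬ ((((1:Int)) == 0) = true))]
        rw [ih]
        unfold indexdif_alt
        rw [if_neg (by omega : ¬ ((n : Int) ≤ 0)), if_neg (by omega : ¬ ((n : Int) + 2 ≤ 0)),
          hemod _ hn, hemod _ (by omega : (0:Int) ≤ (n : Int) + 2), hpar1,
          show ((n : Int) + 2) % 2 = 1 by omega]
        rw [if_pos (by decide : ((((1:Int)) == 1) = true)),
          if_pos (by decide : ((((1:Int)) == 1) = true))]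
        rw [hr2, List.foldl_append]
        simp only [List.foldl_cons, List.foldl_nil]
        rw [show (n : Int) - 1 + 1 = (n : Int) by omega, show (n : Int) + 2 - 1 = (n : Int) + 1 by omega]
        simp only [PySem.List.pyGetD_natCast, List.getD_eq_getElem?_getD]
        ring

-- ===== VERDICT (by name: the statement is the Claim_ definition above) =====
theorem indexdif_spec : Claim_equal_indexdif := by
  intro i1 i2 _ _
  unfold Spec_indexdif
  by_cases h : 0 ≤ i1
  · obtain ⟨n, rfl⟩ : ∃ n : Nat, i1 = (n : Int) := ⟨i1.toNat, by omega⟩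
    exact indexdif_eq_alt_nat n i2
  · unfold indexdif indexdif_alt
    rw [PySem.List.pyRange_one_eq_nil (by omega : i1 ≤ 0), if_pos (by omega : i1 ≤ 0)]
    rfl
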